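-- pv_equiv track=rewrite | github.com/pinheiroo/Projeto-e-Analise-de-Algoritmos | 2524.py | ContaBalas
-- ===== SOURCE A (Python) =====
-- def ContaBalas(children:int,packs:list,i:int):
--     if i == 0:
--         return 0
--     if sum(packs)%children == 0:
--         return i
--     else:
--         top_i = 0
--         for j in range(len(packs)):
--             if packs[j] != 0:
--                 prev = packs[j]
--                 packs[j]=0
--                 top_i = max(top_i,ContaBalas(children,packs,i-1))
--                 packs[j]=prev
--         return top_i
-- ===== SOURCE B (Python) =====
-- def ContaBalas(children: int, packs: list, i: int):
--     if i == 0: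
--         return 0
--     total = sum(packs)
--     if total % children == 0:
--         return i
--     # minimum number of nonzero packs whose removal makes the rest divisible,
--     # found by a take/skip recursion over the list instead of branching over positions
--     m = _min_removals(children, packs, total)
--     return max(0, i - m)
--
-- def _min_removals(children, packs, t):
--     # min size of a sub-collection of the nonzero elements of packs summing to t mod children; None if impossible
--     if not packs:
--         return 0 if t % children == 0 else None
--     p = packs[0]
--     rest = packs[1:]
--     skip = _min_removals(children, rest, t)
--     if p == 0:
--         return skip
--     take = _min_removals(children, rest, t - p)
--     if take is not None:
--         take = take + 1
--     if skip is None: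
--         return take
--     if take is None:
--         return skip
--     return min(skip, take)
-- ===== Notes on version B (the rewrite author's own statement) =====
-- stated objective: alternative
-- what changed: A searches every order of zeroing nonzero positions (branching recursion with mutation, max over remaining depth); B computes the minimum number m of nonzero packs whose sum is congruent to sum(packs) mod children by a single take/skip recursion over the list and returns max(0, i - m) in closed form.
import Mathlib
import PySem

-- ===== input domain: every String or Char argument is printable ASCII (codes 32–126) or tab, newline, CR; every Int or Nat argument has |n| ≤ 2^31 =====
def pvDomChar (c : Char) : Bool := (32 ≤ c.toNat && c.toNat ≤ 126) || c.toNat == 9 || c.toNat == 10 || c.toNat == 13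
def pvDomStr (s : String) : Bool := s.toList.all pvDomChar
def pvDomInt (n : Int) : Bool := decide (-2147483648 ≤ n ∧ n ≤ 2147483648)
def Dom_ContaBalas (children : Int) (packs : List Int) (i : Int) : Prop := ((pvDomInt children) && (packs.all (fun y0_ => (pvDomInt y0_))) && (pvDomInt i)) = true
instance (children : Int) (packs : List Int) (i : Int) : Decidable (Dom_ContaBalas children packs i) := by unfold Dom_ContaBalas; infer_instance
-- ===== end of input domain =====

-- B replaces A's branching over every order of removable positions by a take/skip
-- recursion computing the minimum number m of nonzero packs to remove, then the closed
-- formula max(0, i - m); objective: alternative.  (A temporarily mutates `packs` but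
-- restores it before returning, so the caller observes no mutation.)

-- ===== PORT A =====
-- number of nonzero entries: the termination measure of A's recursion
def pvNZ (l : List Int) : Nat := (l.filter (fun p => !decide (p = 0))).length

-- zeroing a nonzero entry strictly decreases the count of nonzero entries (used by decreasing_by)
theorem pvNZ_set_lt (l : List Int) (j : Nat) (h : j < l.length) (hnz : l[j] ≠ 0) :
    pvNZ (l.set j 0) < pvNZ l := by
  induction l generalizing j with
  | nil => simp at h
  | cons p r ih =>
    cases j with
    | zero => simp at hnz; simp [pvNZ, hnz]
    | succ j =>
      simp at h hnz
      have := ih j h hnz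
      by_cases hp : p = 0 <;> simp [pvNZ, hp] at this ⊢ <;> omega

mutual
-- literal transliteration of A: the for-loop is ContaBalasLoop (index j, accumulator top_i);
-- since packs[j] is restored right after the recursive call, each iteration recurses on
-- (packs with position j zeroed) built from the loop's unchanged packs
def ContaBalas (children : Int) (packs : List Int) (i : Int) : Int :=
  if i = 0 then 0
  else if PySem.Int.mod packs.sum children = 0 then i
  else ContaBalasLoop children packs i 0 0
termination_by (pvNZ packs, packs.length + 1)
decreasing_by exact Prod.Lex.right _ (by omega)

def ContaBalasLoop (children : Int) (packs : List Int) (i : Int) (j : Nat) (top_i : Int) : Int :=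
  if h : j < packs.length then
    if packs[j] ≠ 0 then
      ContaBalasLoop children packs i (j+1)
        (max top_i (ContaBalas children (packs.set j 0) (i-1)))
    else
      ContaBalasLoop children packs i (j+1) top_i
  else top_i
termination_by (pvNZ packs, packs.length - j)
decreasing_by
  · exact Prod.Lex.left _ _ (pvNZ_set_lt packs j h (by assumption))
  · exact Prod.Lex.right _ (by omega)
  · exact Prod.Lex.right _ (by omega)
end

-- ===== PORT B =====
-- transliteration of _min_removals: minimum size of a sub-collection of the nonzero
-- elements of packs summing to t modulo children; none = Python's None
def minRemovals (children : Int) (packs : List Int) (t : Int) : Option Int :=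
  match packs with
  | [] => if PySem.Int.mod t children = 0 then some 0 else none
  | p :: rest =>
    let skip := minRemovals children rest t
    if p = 0 then skip
    else
      let take := (minRemovals children rest (t - p)).map (· + 1)
      match skip, take with
      | none, tk => tk
      | some sk, none => some sk
      | some sk, some tk => some (min sk tk)

def ContaBalas_alt (children : Int) (packs : List Int) (i : Int) : Int :=
  if i = 0 then 0
  else if PySem.Int.mod packs.sum children = 0 then i
  else
    match minRemovals children packs packs.sum with
    | some m => max 0 (i - m)
    -- unreachable: removing every nonzero pack always works (minRemovals_sum_isSome below);
    -- Python would raise TypeError here, which never happens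
    | none => 0

-- ===== PRECONDITION & SPEC =====
-- children = 0 makes Python's `sum(packs) % children` raise ZeroDivisionError (in both A and B)
def Pre_ContaBalas (children : Int) (packs : List Int) (i : Int) : Prop := children ≠ 0
instance (children : Int) (packs : List Int) (i : Int) : Decidable (Pre_ContaBalas children packs i) := by unfold Pre_ContaBalas; infer_instance

def pvWitness_ContaBalas : Int × List Int × Int := (2, [1, 2, 4], 3)

def Spec_ContaBalas (children : Int) (packs : List Int) (i : Int) (out : Int) : Prop := out = ContaBalas_alt children packs i
instance (children : Int) (packs : List Int) (i : Int) (out : Int) : Decidable (Spec_ContaBalas children packs i out) := by unfold Spec_ContaBalas; infer_instance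

-- ===== CLAIM (what is proved, stated in full; the proofs are below) =====
def Claim_equal_ContaBalas : Prop := ∀ (children : Int) (packs : List Int) (i : Int), Dom_ContaBalas children packs i → Pre_ContaBalas children packs i → Spec_ContaBalas children packs i (ContaBalas children packs i)

-- ===== LEMMAS AND PROOFS =====

-- sum is unchanged by dropping zeros
theorem pv_sum_filter (l : List Int) : (l.filter (fun p => !decide (p = 0))).sum = l.sum := by
  induction l with
  | nil => rfl
  | cons p r ih => by_cases hp : p = 0 <;> simp [hp, ih]

-- soundness: a value of minRemovals is the size of a sub-multiset of the nonzero
-- elements whose sum is ≡ t (mod children)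
theorem minRemovals_sound (c : Int) (l : List Int) (t m : Int)
    (h : minRemovals c l t = some m) :
    ∃ s : Multiset Int, s ≤ ↑(l.filter (fun p => !decide (p = 0))) ∧
      c ∣ (t - s.sum) ∧ (s.card : Int) = m := by
  induction l generalizing t m with
  | nil =>
    simp only [minRemovals] at h
    split at h
    · rename_i hd
      obtain rfl : (0 : Int) = m := by simpa using h
      exact ⟨0, le_rfl, by simpa using (PySem.Int.mod_eq_zero_iff_dvd t c).mp hd, by simp⟩
    · simp at h
  | cons p rest ih =>
    by_cases hp : p = 0
    · simp only [minRemovals, if_pos hp] at h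
      obtain ⟨s, hs, hd, hc⟩ := ih t m h
      exact ⟨s, by simpa [List.filter_cons, hp] using hs, hd, hc⟩
    · have hskipcase : ∀ sk, minRemovals c rest t = some sk →
          ∃ s : Multiset Int, s ≤ ↑((p :: rest).filter (fun p => !decide (p = 0))) ∧
            c ∣ (t - s.sum) ∧ (s.card : Int) = sk := by
        intro sk hsk
        obtain ⟨s, hs, hd, hc⟩ := ih t sk hsk
        have hsub : (↑(rest.filter (fun p => !decide (p = 0))) : Multiset Int) ≤
            ↑((p :: rest).filter (fun p => !decide (p = 0))) := by
          simp [hp, ← Multiset.cons_coe]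
          exact Multiset.le_cons_self _ _
        exact ⟨s, le_trans hs hsub, hd, hc⟩
      have htakecase : ∀ tk, minRemovals c rest (t - p) = some tk →
          ∃ s : Multiset Int, s ≤ ↑((p :: rest).filter (fun p => !decide (p = 0))) ∧
            c ∣ (t - s.sum) ∧ (s.card : Int) = tk + 1 := by
        intro tk htk
        obtain ⟨s, hs, hd, hc⟩ := ih (t - p) tk htk
        refine ⟨p ::ₘ s, ?_, ?_, by simp [hc]⟩
        · simpa [List.filter_cons, hp, ← Multiset.cons_coe] using (Multiset.cons_le_cons_iff p).mpr hs
        · simpa [sub_sub] using hd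
      rcases hskip : minRemovals c rest t with _ | sk <;>
        rcases htake : minRemovals c rest (t - p) with _ | tk <;>
          simp only [minRemovals, if_neg hp, hskip, htake, Option.map_some, Option.map_none] at h
      · simp at h
      · obtain rfl : tk + 1 = m := by simpa using h
        exact htakecase tk htake
      · obtain rfl : sk = m := by simpa using h
        exact hskipcase sk hskip
      · obtain rfl : min sk (tk + 1) = m := by simpa using h
        rcases le_total sk (tk + 1) with hle | hle
        · rw [min_eq_left hle]; exact hskipcase sk hskip
        · rw [min_eq_right hle]; exact htakecase tk htake

-- minimality: minRemovals returns a value ≤ the size of ANY such sub-multiset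
theorem minRemovals_min (c : Int) (l : List Int) (t : Int) (s : Multiset Int)
    (hs : s ≤ ↑(l.filter (fun p => !decide (p = 0))))
    (hd : c ∣ (t - s.sum)) :
    ∃ m, minRemovals c l t = some m ∧ m ≤ (s.card : Int) := by
  induction l generalizing t s with
  | nil =>
    obtain rfl : s = 0 := by simpa using Multiset.le_zero.mp (by simpa using hs)
    refine ⟨0, ?_, by simp⟩
    simp only [minRemovals, if_pos ((PySem.Int.mod_eq_zero_iff_dvd t c).mpr (by simpa using hd))]
  | cons p rest ih =>
    by_cases hp : p = 0
    · obtain ⟨m, hm, hle⟩ := ih t s (by simpa [List.filter_cons, hp] using hs) hd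
      exact ⟨m, by simp only [minRemovals, if_pos hp]; exact hm, hle⟩
    · simp only [List.filter_cons, hp, Bool.not_eq_true', decide_eq_false_iff_not] at hs
      rw [if_pos (by simp), ← Multiset.cons_coe] at hs
      by_cases hmem : p ∈ s
      · -- take branch
        have hcons := Multiset.cons_erase hmem
        have hs' : s.erase p ≤ ↑(rest.filter (fun p => !decide (p = 0))) := by
          rw [← hcons] at hs
          exact (Multiset.cons_le_cons_iff p).mp hs
        have hd' : c ∣ (t - p - (s.erase p).sum) := by
          have : s.sum = p + (s.erase p).sum := by rw [← hcons]; simp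
          rw [this] at hd
          simpa [sub_sub] using hd
        obtain ⟨m2, hm2, hle2⟩ := ih (t - p) (s.erase p) hs' hd'
        have hcard : (s.card : Int) = (s.erase p).card + 1 := by
          rw [← hcons]; simp
        rcases hskip : minRemovals c rest t with _ | sk <;>
          refine ⟨?_, by simp only [minRemovals, if_neg hp, hskip, hm2, Option.map_some]; rfl, ?_⟩
        · omega
        · simp only [min_le_iff]; omega
      · -- skip branch
        have hs' : s ≤ ↑(rest.filter (fun p => !decide (p = 0))) :=
          (Multiset.le_cons_of_notMem hmem).mp hs
        obtain ⟨m1, hm1, hle1⟩ := ih t s hs' hd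
        rcases htake : minRemovals c rest (t - p) with _ | tk <;>
          refine ⟨?_, by simp only [minRemovals, if_neg hp, htake, hm1, Option.map_some, Option.map_none]; rfl, ?_⟩
        · exact hle1
        · simp only [min_le_iff]; omega

theorem minRemovals_nonneg (c : Int) (l : List Int) (t m : Int)
    (h : minRemovals c l t = some m) : 0 ≤ m := by
  obtain ⟨s, -, -, hc⟩ := minRemovals_sound c l t m h
  omega

theorem minRemovals_sum_isSome (c : Int) (l : List Int) :
    ∃ m, minRemovals c l (l.sum) = some m := by
  obtain ⟨m, hm, -⟩ := minRemovals_min c l (l.sum) ↑(l.filter (fun p => !decide (p = 0)))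
    le_rfl (by rw [Multiset.sum_coe, pv_sum_filter]; simp)
  exact ⟨m, hm⟩

-- the nonzero elements of packs are those of (packs.set j 0) plus packs[j]
theorem pv_filter_set (l : List Int) (j : Nat) (h : j < l.length) (hnz : l[j] ≠ 0) :
    (↑(l.filter (fun p => !decide (p = 0))) : Multiset Int) =
      l[j] ::ₘ ↑((l.set j 0).filter (fun p => !decide (p = 0))) := by
  induction l generalizing j with
  | nil => simp at h
  | cons p r ih =>
    cases j with
    | zero => simp at hnz; simp [hnz]
    | succ j =>
      simp at h hnz
      have := ih j h hnz
      by_cases hp : p = 0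
      · simpa [List.filter_cons, hp] using this
      · simp [hp, ← Multiset.cons_coe, this, Multiset.cons_swap]

theorem pv_sum_set (l : List Int) (j : Nat) (h : j < l.length) :
    (l.set j 0).sum = l.sum - l[j] := by
  induction l generalizing j with
  | nil => simp at h
  | cons p r ih =>
    cases j with
    | zero => simp
    | succ j => simp at h; simp [ih j h]; omega

-- key recurrence, ≤ direction: removing position j first costs at most 1 + optimum of the rest
theorem pv_m_le (c : Int) (packs : List Int) (m : Int)
    (hm : minRemovals c packs packs.sum = some m)
    (j : Nat) (h : j < packs.length) (hnz : packs[j] ≠ 0) (mj : Int)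
    (hmj : minRemovals c (packs.set j 0) (packs.set j 0).sum = some mj) :
    m ≤ mj + 1 := by
  obtain ⟨s, hs, hd, hc⟩ := minRemovals_sound c _ _ _ hmj
  have hsub : packs[j] ::ₘ s ≤ ↑(packs.filter (fun p => !decide (p = 0))) := by
    rw [pv_filter_set packs j h hnz]
    exact (Multiset.cons_le_cons_iff _).mpr hs
  have hd' : c ∣ (packs.sum - (packs[j] ::ₘ s).sum) := by
    rw [pv_sum_set packs j h] at hd
    simpa [Multiset.sum_cons, sub_sub, add_comm] using hd
  obtain ⟨m', hm', hle⟩ := minRemovals_min c packs packs.sum _ hsub hd'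
  rw [hm] at hm'
  obtain rfl : m = m' := by simpa using hm'
  simp [Multiset.card_cons] at hle
  omega

-- key recurrence, ≥ direction: some position j realises the optimum
theorem pv_m_ge (c : Int) (packs : List Int) (m : Int) (hc : ¬ c ∣ packs.sum)
    (hm : minRemovals c packs packs.sum = some m) :
    ∃ (j : Nat) (h : j < packs.length), packs[j] ≠ 0 ∧
      ∃ mj, minRemovals c (packs.set j 0) (packs.set j 0).sum = some mj ∧ mj ≤ m - 1 := by
  obtain ⟨s, hs, hd, hc2⟩ := minRemovals_sound c _ _ _ hm
  have hsne : s ≠ 0 := by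
    rintro rfl
    exact hc (by simpa using hd)
  obtain ⟨a, ha⟩ := Multiset.exists_mem_of_ne_zero hsne
  have hamem : a ∈ packs.filter (fun p => !decide (p = 0)) := by
    have := Multiset.mem_of_le hs ha
    simpa using this
  have hanz : a ≠ 0 := by
    have := List.of_mem_filter hamem
    simpa using this
  obtain ⟨j, hj, hja⟩ := List.mem_iff_getElem.mp (List.mem_of_mem_filter hamem)
  refine ⟨j, hj, by rw [hja]; exact hanz, ?_⟩
  have hfil := pv_filter_set packs j hj (by rw [hja]; exact hanz)
  rw [hja] at hfil
  have hs' : s.erase a ≤ ↑((packs.set j 0).filter (fun p => !decide (p = 0))) := by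
    have := Multiset.erase_le_erase a hs
    rwa [hfil, Multiset.erase_cons_head] at this
  have hsum : s.sum = a + (s.erase a).sum := by
    conv_lhs => rw [← Multiset.cons_erase ha]
    simp
  have hd' : c ∣ ((packs.set j 0).sum - (s.erase a).sum) := by
    rw [pv_sum_set packs j hj, hja]
    have h2 : packs.sum - a - (s.erase a).sum = packs.sum - s.sum := by rw [hsum]; ring
    rw [h2]
    exact hd
  obtain ⟨mj, hmj, hlej⟩ := minRemovals_min c _ _ _ hs' hd'
  refine ⟨mj, hmj, ?_⟩
  have hcard : s.card = (s.erase a).card + 1 := by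
    conv_lhs => rw [← Multiset.cons_erase ha]
    simp
  omega

-- B's value, clipped at 0, is the closed formula (any i, including i ≤ 0)
theorem pv_alt_formula (c : Int) (q : List Int) (i mq : Int)
    (hmq : minRemovals c q q.sum = some mq) :
    max 0 (ContaBalas_alt c q i) = max 0 (i - mq) := by
  have h0 : 0 ≤ mq := minRemovals_nonneg c q q.sum mq hmq
  by_cases hi : i = 0
  · subst hi
    simp [ContaBalas_alt]
    omega
  · by_cases hdiv : PySem.Int.mod q.sum c = 0
    · have hmq0 : mq = 0 := by
        obtain ⟨m', hm', hle⟩ := minRemovals_min c q q.sum 0 (Multiset.zero_le _)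
          (by simpa using (PySem.Int.mod_eq_zero_iff_dvd q.sum c).mp hdiv)
        rw [hmq] at hm'
        simp at hm' hle
        omega
      subst hmq0
      simp [ContaBalas_alt, hi, hdiv]
    · simp only [ContaBalas_alt, if_neg hi, if_neg hdiv, hmq]
      omega

-- loop bounds
theorem pv_loop_ge_top (c : Int) (packs : List Int) (i : Int) (j : Nat) (top : Int) :
    top ≤ ContaBalasLoop c packs i j top := by
  induction hn : packs.length - j generalizing j top with
  | zero => rw [ContaBalasLoop, dif_neg (by omega)]
  | succ n ih =>
    rw [ContaBalasLoop, dif_pos (show j < packs.length by omega)]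
    split
    · exact le_trans (le_max_left _ _) (ih (j+1) _ (by omega))
    · exact ih (j+1) _ (by omega)

theorem pv_loop_ge_branch (c : Int) (packs : List Int) (i : Int) (j : Nat) (top : Int)
    (jj : Nat) (hj : j ≤ jj) (h : jj < packs.length) (hnz : packs[jj] ≠ 0) :
    ContaBalas c (packs.set jj 0) (i-1) ≤ ContaBalasLoop c packs i j top := by
  induction hn : packs.length - j generalizing j top with
  | zero => omega
  | succ n ih =>
    rw [ContaBalasLoop]
    have hjlt : j < packs.length := by omega
    rw [dif_pos hjlt]
    by_cases hje : jj = j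
    · subst hje
      rw [if_pos hnz]
      exact le_trans (le_max_right _ _) (pv_loop_ge_top c packs i _ _)
    · have hj' : j + 1 ≤ jj := by omega
      split
      · exact ih (j+1) _ hj' (by omega)
      · exact ih (j+1) _ hj' (by omega)

theorem pv_loop_le (c : Int) (packs : List Int) (i : Int) (j : Nat) (top B : Int)
    (htop : top ≤ B)
    (hb : ∀ jj, j ≤ jj → ∀ h : jj < packs.length, packs[jj] ≠ 0 →
      ContaBalas c (packs.set jj 0) (i-1) ≤ B) :
    ContaBalasLoop c packs i j top ≤ B := by
  have main : ∀ (n j : Nat) (top : Int), packs.length - j = n → top ≤ B →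
      (∀ jj, j ≤ jj → ∀ h : jj < packs.length, packs[jj] ≠ 0 →
        ContaBalas c (packs.set jj 0) (i-1) ≤ B) →
      ContaBalasLoop c packs i j top ≤ B := by
    intro n
    induction n with
    | zero =>
      intro j top hn ht _
      rw [ContaBalasLoop, dif_neg (by omega)]
      exact ht
    | succ n ih =>
      intro j top hn ht hbb
      rw [ContaBalasLoop, dif_pos (show j < packs.length by omega)]
      split
      · exact ih (j+1) _ (by omega)
          (max_le ht (hbb j le_rfl (by omega) (by assumption)))
          (fun jj hjj => hbb jj (by omega))
      · exact ih (j+1) _ (by omega) ht (fun jj hjj => hbb jj (by omega))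
  exact main (packs.length - j) j top rfl htop hb

-- main equivalence, by strong induction on the number of nonzero packs
theorem pv_main (c : Int) (packs : List Int) (i : Int) :
    ContaBalas c packs i = ContaBalas_alt c packs i := by
  generalize hgen : pvNZ packs = n
  induction n using Nat.strong_induction_on generalizing packs i with
  | _ n ih =>
  rw [ContaBalas]
  by_cases hi : i = 0
  · simp [ContaBalas_alt, hi]
  · by_cases hdiv : PySem.Int.mod packs.sum c = 0
    · simp [ContaBalas_alt, hi, hdiv]
    · rw [if_neg hi, if_neg hdiv]
      have hnd : ¬ c ∣ packs.sum := fun hd => hdiv ((PySem.Int.mod_eq_zero_iff_dvd _ _).mpr hd)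
      obtain ⟨m, hm⟩ := minRemovals_sum_isSome c packs
      rw [ContaBalas_alt, if_neg hi, if_neg hdiv, hm]
      -- for every removable position jj, the recursive value is A = B by the IH
      have hrec : ∀ (jj : Nat) (h : jj < packs.length), packs[jj] ≠ 0 →
          ContaBalas c (packs.set jj 0) (i-1) = ContaBalas_alt c (packs.set jj 0) (i-1) := by
        intro jj h hnz
        exact ih (pvNZ (packs.set jj 0)) (hgen ▸ pvNZ_set_lt packs jj h hnz) _ _ rfl
      apply le_antisymm
      · -- each branch is bounded by max 0 (i - m), since m ≤ mjj + 1
        apply pv_loop_le c packs i 0 0 _ (le_max_left _ _)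
        intro jj _ h hnz
        obtain ⟨mjj, hmjj⟩ := minRemovals_sum_isSome c (packs.set jj 0)
        have hle := pv_m_le c packs m hm jj h hnz mjj hmjj
        calc ContaBalas c (packs.set jj 0) (i-1)
            = ContaBalas_alt c (packs.set jj 0) (i-1) := hrec jj h hnz
          _ ≤ max 0 (ContaBalas_alt c (packs.set jj 0) (i-1)) := le_max_right _ _
          _ = max 0 ((i-1) - mjj) := pv_alt_formula c _ _ _ hmjj
          _ ≤ max 0 (i - m) := max_le (le_max_left _ _)
              (le_trans (by omega) (le_max_right _ _))
      · -- some branch attains max 0 (i - m), since some mjj ≤ m - 1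
        obtain ⟨jj, h, hnz, mjj, hmjj, hle⟩ := pv_m_ge c packs m hnd hm
        have hb := pv_loop_ge_branch c packs i 0 0 jj (Nat.zero_le _) h hnz
        have h0 := pv_loop_ge_top c packs i 0 0
        have hmax : max 0 (ContaBalas_alt c (packs.set jj 0) (i-1)) ≤
            ContaBalasLoop c packs i 0 0 := max_le h0 (hrec jj h hnz ▸ hb)
        rw [pv_alt_formula c _ _ _ hmjj] at hmax
        exact max_le h0 (le_trans (le_trans (by omega) (le_max_right 0 ((i-1) - mjj))) hmax)

-- ===== VERDICT (by name: the statement is the Claim_ definition above) =====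
theorem ContaBalas_spec : Claim_equal_ContaBalas := by
  intro children packs i _ _
  unfold Spec_ContaBalas
  exact pv_main children packs i
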